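-- pv_equiv track=rewrite | github.com/broadinstitute/oncotator | oncotator/TranscriptProviderUtils.py | _transform_to_feature_space
-- ===== SOURCE A (Python) =====
-- def _transform_to_feature_space(exons, s, strand):
--     """
--     Assumes exons are in order given strand, though their start > end
--     :param exons:
--     :param s:
--     :param strand:
--     :return:
--     """
--     d = 0
--     for exon in exons:
--
--         if strand =="+":
--             if s > exon[0] and s <= exon[1]:
--                 d += (s - exon[0])
--                 break
--         else:
--             if s >= exon[0] and s < exon[1]:
--                 d += (exon[1] - s)
--                 break
--
--         if (s > exon[1] and strand == "+") or (s < exon[0] and strand == "-"):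
--             d += (exon[1] - exon[0])
--         else:
--             break
--     return d
-- ===== SOURCE B (Python) =====
-- def _transform_to_feature_space(exons, s, strand):
--     """Cumulative feature-space offset of genomic position s along exons."""
--     if not exons:
--         return 0
--     (lo, hi), rest = exons[0], exons[1:]
--     inside = lo < s <= hi if strand == "+" else lo <= s < hi
--     if inside:
--         return (s - lo) if strand == "+" else (hi - s)
--     if (strand == "+" and s > hi) or (strand == "-" and s < lo):
--         return (hi - lo) + _transform_to_feature_space(rest, s, strand)
--     return 0
-- ===== Notes on version B (the rewrite author's own statement) =====
-- stated objective: simpler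
-- what changed: Replaces A's stateful loop (accumulator d, two break sites, duplicated strand branches inside the loop body) by a short structural recursion that composes the result on return: containment answers directly with the in-exon offset, the 'position lies beyond this exon in transcription direction' test adds the exon length to the recursive result, anything else is 0.
import Mathlib
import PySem

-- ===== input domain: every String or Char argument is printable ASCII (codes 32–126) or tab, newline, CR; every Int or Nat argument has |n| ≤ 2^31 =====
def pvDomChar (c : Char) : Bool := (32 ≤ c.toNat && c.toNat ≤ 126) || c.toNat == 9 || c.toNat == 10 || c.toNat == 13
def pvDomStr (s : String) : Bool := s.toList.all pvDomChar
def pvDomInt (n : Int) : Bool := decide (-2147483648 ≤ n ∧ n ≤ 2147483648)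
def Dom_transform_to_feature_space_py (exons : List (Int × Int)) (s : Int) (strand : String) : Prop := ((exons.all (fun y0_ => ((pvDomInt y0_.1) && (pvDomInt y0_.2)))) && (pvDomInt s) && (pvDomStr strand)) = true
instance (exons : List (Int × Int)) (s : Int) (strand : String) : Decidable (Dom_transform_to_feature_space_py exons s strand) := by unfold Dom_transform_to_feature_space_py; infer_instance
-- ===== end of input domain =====

-- B replaces A's stateful loop (accumulator, two break sites, duplicated strand branches)
-- by a short structural recursion composing the result on return (objective: simpler).

-- ===== PORT A =====
def pyALoop (s : Int) (strand : String) : List (Int × Int) → Int → Int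
  | [], d => d
  | e :: rest, d =>
    if strand = "+" then
      if s > e.1 ∧ s ≤ e.2 then d + (s - e.1)
      else if (s > e.2 ∧ strand = "+") ∨ (s < e.1 ∧ strand = "-") then
        pyALoop s strand rest (d + (e.2 - e.1))
      else d
    else
      if s ≥ e.1 ∧ s < e.2 then d + (e.2 - s)
      else if (s > e.2 ∧ strand = "+") ∨ (s < e.1 ∧ strand = "-") then
        pyALoop s strand rest (d + (e.2 - e.1))
      else d

def transform_to_feature_space_py (exons : List (Int × Int)) (s : Int) (strand : String) : Int :=
  pyALoop s strand exons 0

-- ===== PORT B =====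
def pvAltGo (s : Int) (strand : String) : List (Int × Int) → Int
  | [] => 0
  | (lo, hi) :: rest =>
    let inside := if strand = "+" then decide (lo < s ∧ s ≤ hi) else decide (lo ≤ s ∧ s < hi)
    if inside then (if strand = "+" then s - lo else hi - s)
    else if (strand = "+" ∧ s > hi) ∨ (strand = "-" ∧ s < lo) then
      (hi - lo) + pvAltGo s strand rest
    else 0

def transform_to_feature_space_py_alt (exons : List (Int × Int)) (s : Int) (strand : String) : Int :=
  pvAltGo s strand exons

-- ===== PRECONDITION & SPEC =====
def Spec_transform_to_feature_space_py (exons : List (Int × Int)) (s : Int) (strand : String) (out : Int) : Prop := out = transform_to_feature_space_py_alt exons s strand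
instance (exons : List (Int × Int)) (s : Int) (strand : String) (out : Int) : Decidable (Spec_transform_to_feature_space_py exons s strand out) := by unfold Spec_transform_to_feature_space_py; infer_instance

-- ===== CLAIM =====
def Claim_equal_transform_to_feature_space_py : Prop := ∀ (exons : List (Int × Int)) (s : Int) (strand : String), Dom_transform_to_feature_space_py exons s strand → Spec_transform_to_feature_space_py exons s strand (transform_to_feature_space_py exons s strand)

-- ===== LEMMAS AND PROOFS =====
lemma pyALoop_eq_go (s : Int) (strand : String) (exons : List (Int × Int)) (d : Int) :
    pyALoop s strand exons d = d + pvAltGo s strand exons := by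
  induction exons generalizing d with
  | nil => simp [pyALoop, pvAltGo]
  | cons e rest ih =>
    obtain ⟨lo, hi⟩ := e
    by_cases hp : strand = "+"
    · subst hp
      by_cases hc : lo < s ∧ s ≤ hi
      · have hc' : s > lo ∧ s ≤ hi := ⟨hc.1, hc.2⟩
        simp [pyALoop, pvAltGo, hc, hc']
      · have hc' : ¬ (s > lo ∧ s ≤ hi) := fun h => hc ⟨h.1, h.2⟩
        by_cases hb : s > hi
        · simp [pyALoop, pvAltGo, hc, hc', hb, ih]
          try ring
        · simp [pyALoop, pvAltGo, hc, hc', hb]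
    · by_cases hm : strand = "-"
      · subst hm
        by_cases hc : lo ≤ s ∧ s < hi
        · have hc' : s ≥ lo ∧ s < hi := ⟨hc.1, hc.2⟩
          simp [pyALoop, pvAltGo, hc, hc']
        · have hc' : ¬ (s ≥ lo ∧ s < hi) := fun h => hc ⟨h.1, h.2⟩
          by_cases hb : s < lo
          · simp [pyALoop, pvAltGo, hc, hc', hb, ih]
            try ring
          · simp [pyALoop, pvAltGo, hc, hc', hb]
      · -- strand is neither "+" nor "-": both stop at the first exon
        have hc' : (s ≥ lo ∧ s < hi) ↔ (lo ≤ s ∧ s < hi) := ⟨fun h => ⟨h.1, h.2⟩, fun h => ⟨h.1, h.2⟩⟩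
        by_cases hc : lo ≤ s ∧ s < hi
        · simp [pyALoop, pvAltGo, hp, hm, hc, hc']
        · simp [pyALoop, pvAltGo, hp, hm, hc, hc']

-- ===== VERDICT =====
theorem transform_to_feature_space_py_spec : Claim_equal_transform_to_feature_space_py := by
  intro exons s strand _
  unfold Spec_transform_to_feature_space_py transform_to_feature_space_py transform_to_feature_space_py_alt
  rw [pyALoop_eq_go]
  omega
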